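-- pv_equiv track=rewrite | github.com/haritper/order-sheet-ira | app/pricing_integration/datasheet.py | nearest_supported_size
-- ===== SOURCE A (Python) =====
-- from typing import Any
--
-- SIZE_SEQUENCE = [
--     "XS",
--     "S",
--     "M",
--     "L",
--     "XL",
--     "2XL",
--     "3XL",
--     "4XL",
--     "WXS",
--     "WS",
--     "WM",
--     "WL",
--     "WXL",
--     "W2XL",
--     "W3XL",
--     "W4XL",
--     "YXXS",
--     "YXS",
--     "YS",
--     "YM",
--     "YL",
--     "YXL",
-- ]
--
-- def nearest_supported_size(size: str, available: dict[str, Any]) -> str | None: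
--     if size in available:
--         return size
--     if not available:
--         return None
--     if size in SIZE_SEQUENCE:
--         target_index = SIZE_SEQUENCE.index(size)
--         for index in range(target_index, -1, -1):
--             candidate = SIZE_SEQUENCE[index]
--             if candidate in available:
--                 return candidate
--         for index in range(target_index + 1, len(SIZE_SEQUENCE)):
--             candidate = SIZE_SEQUENCE[index]
--             if candidate in available:
--                 return candidate
--     return next(iter(available.keys()))
-- ===== SOURCE B (Python) =====
-- SIZE_SEQUENCE = [
--     "XS",
--     "S",
--     "M",
--     "L",
--     "XL",
--     "2XL",
--     "3XL",
--     "4XL",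
--     "WXS",
--     "WS",
--     "WM",
--     "WL",
--     "WXL",
--     "W2XL",
--     "W3XL",
--     "W4XL",
--     "YXXS",
--     "YXS",
--     "YS",
--     "YM",
--     "YL",
--     "YXL",
-- ]
--
--
-- def nearest_supported_size(size, available):
--     if size in available:
--         return size
--     if not available:
--         return None
--     if size in SIZE_SEQUENCE:
--         target_index = SIZE_SEQUENCE.index(size)
--         best_below = None
--         best_above = None
--         for index, candidate in enumerate(SIZE_SEQUENCE):
--             if candidate in available:
--                 if index <= target_index:
--                     best_below = candidate
--                 elif best_above is None:
--                     best_above = candidate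
--         if best_below is not None:
--             return best_below
--         if best_above is not None:
--             return best_above
--     return next(iter(available.keys()))
-- ===== Notes on version B (the rewrite author's own statement) =====
-- stated objective: alternative
-- what changed: Replaces A's two directional early-return index loops over SIZE_SEQUENCE with a single forward collect-then-decide pass that maintains best_below (last available size at or below the target index) and best_above (first available size above it), deciding after the pass.
import Mathlib
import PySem

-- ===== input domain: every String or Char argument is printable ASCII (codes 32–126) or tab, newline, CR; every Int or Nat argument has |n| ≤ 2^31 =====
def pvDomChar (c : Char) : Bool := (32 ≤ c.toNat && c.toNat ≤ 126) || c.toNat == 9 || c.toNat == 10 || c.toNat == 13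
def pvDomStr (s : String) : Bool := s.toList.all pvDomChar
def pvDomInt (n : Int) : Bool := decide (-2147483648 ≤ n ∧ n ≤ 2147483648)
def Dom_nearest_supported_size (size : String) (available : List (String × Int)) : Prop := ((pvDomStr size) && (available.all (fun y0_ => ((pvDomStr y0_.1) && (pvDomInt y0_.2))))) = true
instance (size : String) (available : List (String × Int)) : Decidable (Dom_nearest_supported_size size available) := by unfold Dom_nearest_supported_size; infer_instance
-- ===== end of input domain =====

-- B replaces A's two directional early-return scans of SIZE_SEQUENCE by a single
-- forward collect-then-decide pass (best_below / best_above); same cost, alternative structure.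


-- ===== PORT A =====
def pvSizeSeq : List String :=
  ["XS","S","M","L","XL","2XL","3XL","4XL","WXS","WS","WM","WL","WXL","W2XL","W3XL","W4XL","YXXS","YXS","YS","YM","YL","YXL"]

-- 'c in available' on the dict (key membership)
def pvHasKey (available : List (String × Int)) (c : String) : Bool :=
  available.any (fun p => p.1 == c)

-- A's directional loops: walk a list of indices, return the first candidate present
def pvScanA (available : List (String × Int)) : List Int → Option String
  | [] => none
  | i :: rest =>
    match PySem.List.pyGet? pvSizeSeq i with
    | some c => if pvHasKey available c then some c else pvScanA available rest
    | none => pvScanA available rest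

def nearest_supported_size (size : String) (available : List (String × Int)) : Option String :=
  if pvHasKey available size then some size
  else if available.isEmpty then none
  else if pvSizeSeq.contains size then
    let t : Int := (((PySem.List.index? pvSizeSeq size).getD 0 : Nat) : Int)
    match pvScanA available (PySem.List.pyRange t (-1) (-1)) with
    | some c => some c
    | none =>
      match pvScanA available (PySem.List.pyRange (t + 1) ((pvSizeSeq.length : Int)) 1) with
      | some c => some c
      | none => available.head?.map Prod.fst
  else available.head?.map Prod.fst

-- ===== PORT B =====
-- one step of B's single pass: update (best_below, best_above) at (index, candidate)
def pvStepB (available : List (String × Int)) (t : Int)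
    (st : Option String × Option String) (p : Int × String) : Option String × Option String :=
  if pvHasKey available p.2 then
    if p.1 ≤ t then (some p.2, st.2)
    else
      match st.2 with
      | none => (st.1, some p.2)
      | some _ => st
  else st

def nearest_supported_size_alt (size : String) (available : List (String × Int)) : Option String :=
  if pvHasKey available size then some size
  else if available.isEmpty then none
  else if pvSizeSeq.contains size then
    let t : Int := (((PySem.List.index? pvSizeSeq size).getD 0 : Nat) : Int)
    let r := (PySem.List.enumerate pvSizeSeq 0).foldl (pvStepB available t) (none, none)
    match r.1 with
    | some c => some c
    | none =>
      match r.2 with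
      | some c => some c
      | none => available.head?.map Prod.fst
  else available.head?.map Prod.fst

-- ===== PRECONDITION & SPEC =====
def Spec_nearest_supported_size (size : String) (available : List (String × Int)) (out : Option String) : Prop := out = nearest_supported_size_alt size available
instance (size : String) (available : List (String × Int)) (out : Option String) : Decidable (Spec_nearest_supported_size size available out) := by unfold Spec_nearest_supported_size; infer_instance

-- ===== CLAIM (what is proved, stated in full; the proofs are below) =====
def Claim_equal_nearest_supported_size : Prop := ∀ (size : String) (available : List (String × Int)), Dom_nearest_supported_size size available → Spec_nearest_supported_size size available (nearest_supported_size size available)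

-- ===== LEMMAS AND PROOFS =====

-- unfolding lemma for A's loop body
theorem pvScanA_cons (available : List (String × Int)) (i : Int) (rest : List Int) :
    pvScanA available (i :: rest) =
      match PySem.List.pyGet? pvSizeSeq i with
      | some c => if pvHasKey available c then some c else pvScanA available rest
      | none => pvScanA available rest := rfl

-- pyGet? on a valid Nat index
theorem pv_pyGet (n : Nat) (hn : n < pvSizeSeq.length) :
    PySem.List.pyGet? pvSizeSeq (n : Int) = some (pvSizeSeq[n]) := by
  rw [PySem.List.pyGet?_natCast, List.getElem?_eq_getElem hn]

-- A's downward loop over range(t, -1, -1) finds the last available prefix element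
theorem pv_scan_down (available : List (String × Int)) (t : Nat) (ht : t < pvSizeSeq.length) :
    pvScanA available (PySem.List.pyRange (t : Int) (-1) (-1)) =
      ((pvSizeSeq.take (t + 1)).filter (pvHasKey available)).getLast? := by
  induction t with
  | zero =>
    have hg : PySem.List.pyGet? pvSizeSeq ((0 : Nat) : Int) = some (pvSizeSeq[0]) := pv_pyGet 0 ht
    rw [PySem.List.pyRange_neg_one_cons (by omega),
      show ((0 : Nat) : Int) - 1 = -1 by omega, PySem.List.pyRange_neg_one_eq_nil le_rfl,
      pvScanA_cons, hg]
    rw [List.take_add_one, List.take_zero, List.getElem?_eq_getElem ht]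
    cases hm : pvHasKey available (pvSizeSeq[0]) <;> simp [pvScanA, hm]
  | succ t ih =>
    have ht' : t < pvSizeSeq.length := Nat.lt_of_succ_lt ht
    have hg : PySem.List.pyGet? pvSizeSeq ((t + 1 : Nat) : Int) = some (pvSizeSeq[t + 1]) :=
      pv_pyGet (t + 1) ht
    rw [PySem.List.pyRange_neg_one_cons (a := ((t + 1 : Nat) : Int)) (by omega),
      pvScanA_cons, hg,
      show ((t + 1 : Nat) : Int) - 1 = (t : Int) by omega]
    rw [List.take_add_one, List.getElem?_eq_getElem ht, List.filter_append]
    cases hm : pvHasKey available (pvSizeSeq[t + 1]) <;>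
      simp [hm, ih ht']

-- A's upward loop over range(a, len, 1) finds the first available element of the suffix
theorem pv_scan_up (available : List (String × Int)) (d a : Nat) (h : a + d = pvSizeSeq.length) :
    pvScanA available (PySem.List.pyRange (a : Int) ((pvSizeSeq.length : Int)) 1) =
      (pvSizeSeq.drop a).find? (pvHasKey available) := by
  induction d generalizing a with
  | zero =>
    have ha : a = pvSizeSeq.length := by omega
    rw [PySem.List.pyRange_one_eq_nil (by exact_mod_cast ha.ge), ha, List.drop_length]
    rfl
  | succ d ih =>
    have ha : a < pvSizeSeq.length := by omega
    have hga : PySem.List.pyGet? pvSizeSeq ((a : Nat) : Int) = some (pvSizeSeq[a]) :=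
      pv_pyGet a ha
    have ih' := ih (a + 1) (by omega)
    rw [show ((a + 1 : Nat) : Int) = (a : Int) + 1 by push_cast; ring] at ih'
    simp only [PySem.List.pyRange_one_cons (show (a : Int) < ((pvSizeSeq.length : Nat) : Int) from by exact_mod_cast ha),
      pvScanA_cons, hga]
    rw [List.drop_eq_getElem_cons ha]
    cases hm : pvHasKey available (pvSizeSeq[a])
    · rw [if_neg (by simp), ih', List.find?_cons_of_neg (by simp [hm])]
    · rw [if_pos rfl, List.find?_cons_of_pos hm]

-- overwrite step on the below-accumulator
theorem pv_getLast?_cons_or {α : Type} (c : α) (X : List α) (b : Option α) :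
    ((c :: X).getLast?).or b = X.getLast?.or (some c) := by
  cases X with
  | nil => simp
  | cons d Y =>
    rw [List.getLast?_cons_cons]
    cases hg : (d :: Y).getLast? with
    | none => simp at hg
    | some v => rw [Option.some_or, Option.some_or]

-- characterisation of B's single pass
theorem pv_fold_spec (available : List (String × Int)) (t : Int) (l : List String)
    (k : Int) (b a : Option String) :
    (PySem.List.enumerate l k).foldl (pvStepB available t) (b, a) =
      (((l.take (t - k + 1).toNat).filter (pvHasKey available)).getLast?.or b,
        a.or (((l.drop (t - k + 1).toNat).find? (pvHasKey available)))) := by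
  induction l generalizing k b a with
  | nil => simp [PySem.List.enumerate_nil]
  | cons c rest ih =>
    rw [PySem.List.enumerate_cons, List.foldl_cons]
    by_cases hk : k ≤ t
    · have h1 : (t - k + 1).toNat = (t - (k + 1) + 1).toNat + 1 := by omega
      rw [h1, List.take_succ_cons, List.drop_succ_cons]
      cases hm : pvHasKey available c
      · rw [show pvStepB available t (b, a) (k, c) = (b, a) by simp [pvStepB, hm]]
        rw [ih (k + 1) b a, List.filter_cons_of_neg (by simp [hm])]
      · rw [show pvStepB available t (b, a) (k, c) = (some c, a) by simp [pvStepB, hm, hk]]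
        rw [ih (k + 1) (some c) a, List.filter_cons_of_pos (by simp [hm])]
        rw [pv_getLast?_cons_or]
    · have h1 : (t - k + 1).toNat = 0 := by omega
      have h2 : (t - (k + 1) + 1).toNat = 0 := by omega
      rw [h1, List.take_zero, List.drop_zero]
      cases hm : pvHasKey available c
      · rw [show pvStepB available t (b, a) (k, c) = (b, a) by simp [pvStepB, hm]]
        rw [ih (k + 1) b a, h2, List.take_zero, List.drop_zero,
          List.find?_cons_of_neg (by simp [hm])]
      · have hstep : pvStepB available t (b, a) (k, c) = (b, a.or (some c)) := by
          cases a <;> simp [pvStepB, hm, hk]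
        rw [hstep, ih (k + 1) b (a.or (some c)), h2, List.take_zero, List.drop_zero,
          List.find?_cons_of_pos hm]
        simp

-- ===== VERDICT (by name: the statement is the Claim_ definition above) =====
theorem nearest_supported_size_spec : Claim_equal_nearest_supported_size := by
  intro size available _
  unfold Spec_nearest_supported_size nearest_supported_size nearest_supported_size_alt
  by_cases h1 : pvHasKey available size = true
  · simp only [h1, if_true]
  · simp only [h1, if_false, Bool.false_eq_true]
    by_cases h2 : available.isEmpty = true
    · simp only [h2, if_true]
    · simp only [h2, if_false, Bool.false_eq_true]
      by_cases h3 : pvSizeSeq.contains size = true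
      · simp only [h3, if_true]
        obtain ⟨n, hn⟩ : ∃ n, PySem.List.index? pvSizeSeq size = some n :=
          Option.isSome_iff_exists.mp ((PySem.List.index?_isSome_iff _ _).mpr (by
            simpa using h3))
        obtain ⟨hlt, -, -⟩ := PySem.List.getElem_of_index?_eq_some hn
        rw [hn]
        simp only [Option.getD_some]
        rw [pv_scan_down available n hlt]
        rw [show ((n : Int) + 1) = ((n + 1 : Nat) : Int) by push_cast; ring]
        rw [pv_scan_up available (pvSizeSeq.length - (n + 1)) (n + 1) (by omega)]
        rw [pv_fold_spec available (n : Int) pvSizeSeq 0 none none]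
        rw [show ((n : Int) - 0 + 1).toNat = n + 1 by omega]
        simp only [Option.or_none, Option.none_or]
      · simp only [h3, if_false, Bool.false_eq_true]
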